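-- pv_equiv track=rewrite | github.com/Amin-Mohamed1/ConnectFourGame | Application/Services/HeuristicCriterias/CouldConnectFourInTwoMoves.py | __connected_twos_vertical
-- ===== SOURCE A (Python) =====
-- def __connected_twos_vertical(board: list[list[str]], piece: str) -> int:
--     score: int = 0
--     for col in range(len(board[0])):
--         piece_count: int = 0
--         for row in range(len(board)):
--             if board[row][col] == piece:
--                 piece_count += 1
--                 if piece_count >= 2:
--                     if row + 2 < len(board) and board[row + 1][col] == '' and board[row + 2][col] == '':
--                         score += 1
--                     if row - 3 >= 0 and board[row - 2][col] == '' and board[row - 3][col] == '':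
--                         score += 1
--             else:
--                 piece_count = 0
--     return score
-- ===== SOURCE B (Python) =====
-- def __connected_twos_vertical(board: list[list[str]], piece: str) -> int:
--     # The score is a pure pattern count: for each column, count the vertical
--     # 4-cell windows equal to (piece, piece, '', '') plus those equal to
--     # ('', '', piece, piece) -- a window [p,p,'',''] is exactly "a run of >=2
--     # ending at its second cell with two empties above to fall into", and
--     # ['','',p,p] the mirrored check below.
--     n = len(board)
--     total = 0
--     for c in range(len(board[0])):
--         for i in range(n - 3):
--             w = (board[i][c], board[i + 1][c], board[i + 2][c], board[i + 3][c])
--             if w == (piece, piece, '', ''):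
--                 total += 1
--             if w == ('', '', piece, piece):
--                 total += 1
--     return total
-- ===== Notes on version B (the rewrite author's own statement) =====
-- stated objective: alternative
-- what changed: B discards A's stateful piece_count accumulator and relative-offset checks entirely and instead characterises the score as a pure pattern count: per column it slides a fixed 4-cell window and counts windows equal to (piece,piece,'','') plus windows equal to ('','',piece,piece).
import Mathlib
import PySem

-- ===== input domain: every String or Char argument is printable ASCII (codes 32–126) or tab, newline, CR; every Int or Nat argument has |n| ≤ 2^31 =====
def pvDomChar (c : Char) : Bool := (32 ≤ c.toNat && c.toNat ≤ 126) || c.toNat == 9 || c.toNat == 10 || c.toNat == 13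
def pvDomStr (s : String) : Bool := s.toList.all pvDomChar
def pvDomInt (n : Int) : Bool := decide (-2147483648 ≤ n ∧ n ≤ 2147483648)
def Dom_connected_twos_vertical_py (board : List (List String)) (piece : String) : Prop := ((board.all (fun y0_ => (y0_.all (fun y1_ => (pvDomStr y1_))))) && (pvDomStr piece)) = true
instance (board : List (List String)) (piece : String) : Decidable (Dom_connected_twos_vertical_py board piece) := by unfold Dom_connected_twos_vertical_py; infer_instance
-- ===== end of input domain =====

-- B replaces A's stateful run-counter scan by counting the vertical 4-cell windows equal to the
-- two literal patterns (piece,piece,'','') and ('','',piece,piece) (objective: alternative).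
-- ===== PORT A =====
-- board[row][col]; total via defaults — under Pre_ every access of either port is in range.
def pvCell (board : List (List String)) (row col : Int) : String :=
  PySem.List.pyGetD (PySem.List.pyGetD board row []) col ""

def connected_twos_vertical_py (board : List (List String)) (piece : String) : Int :=
  (PySem.List.pyRange 0 ((PySem.List.pyGetD board 0 []).length : Int) 1).foldl
    (fun score col =>
      ((PySem.List.pyRange 0 ((board.length : Int)) 1).foldl
        (fun (st : Int × Int) row =>
          if pvCell board row col = piece then
            if st.2 + 1 ≥ 2 then
              (if row - 3 ≥ 0 ∧ pvCell board (row - 2) col = "" ∧ pvCell board (row - 3) col = "" then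
                 (if row + 2 < (board.length : Int) ∧ pvCell board (row + 1) col = "" ∧ pvCell board (row + 2) col = "" then st.1 + 1 else st.1) + 1
               else
                 (if row + 2 < (board.length : Int) ∧ pvCell board (row + 1) col = "" ∧ pvCell board (row + 2) col = "" then st.1 + 1 else st.1),
               st.2 + 1)
            else (st.1, st.2 + 1)
          else (st.1, 0))
        (score, 0)).1)
    0

-- ===== PORT B =====
def connected_twos_vertical_py_alt (board : List (List String)) (piece : String) : Int :=
  (PySem.List.pyRange 0 ((PySem.List.pyGetD board 0 []).length : Int) 1).foldl
    (fun total c =>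
      (PySem.List.pyRange 0 ((board.length : Int) - 3) 1).foldl
        (fun total i =>
          let w := (pvCell board i c, pvCell board (i + 1) c, pvCell board (i + 2) c, pvCell board (i + 3) c)
          let t1 := if w = (piece, piece, "", "") then total + 1 else total
          if w = ("", "", piece, piece) then t1 + 1 else t1)
        total)
    0

-- ===== PRECONDITION & SPEC =====
-- Pre_ excludes exactly the inputs where A raises IndexError: the empty board, and ragged
-- boards in which some row is shorter than row 0 (board[row][col] with col < len(board[0])).
def Pre_connected_twos_vertical_py (board : List (List String)) (piece : String) : Prop :=
  board ≠ [] ∧ ∀ r ∈ board, (board.headD []).length ≤ r.length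
instance (board : List (List String)) (piece : String) : Decidable (Pre_connected_twos_vertical_py board piece) := by unfold Pre_connected_twos_vertical_py; infer_instance

def pvWitness_connected_twos_vertical_py : List (List String) × String :=
  ([["x", ""], ["x", "x"], ["", ""], ["", "x"]], "x")

def Spec_connected_twos_vertical_py (board : List (List String)) (piece : String) (out : Int) : Prop := out = connected_twos_vertical_py_alt board piece
instance (board : List (List String)) (piece : String) (out : Int) : Decidable (Spec_connected_twos_vertical_py board piece out) := by unfold Spec_connected_twos_vertical_py; infer_instance

-- ===== CLAIM (what is proved, stated in full; the proofs are below) =====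
def Claim_equal_connected_twos_vertical_py : Prop := ∀ (board : List (List String)) (piece : String), Dom_connected_twos_vertical_py board piece → Pre_connected_twos_vertical_py board piece → Spec_connected_twos_vertical_py board piece (connected_twos_vertical_py board piece)

-- ===== LEMMAS AND PROOFS =====

-- A's run counter after the first k rows of one column (cell getter g).
def pvRun (g : Int → String) (piece : String) : Nat → Int
  | 0 => 0
  | k + 1 => if g k = piece then pvRun g piece k + 1 else 0

theorem pvRun_nonneg (g : Int → String) (piece : String) (k : Nat) : 0 ≤ pvRun g piece k := by
  induction k with
  | zero => simp [pvRun]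
  | succ j ih => simp only [pvRun]; split <;> omega

theorem pvRun_pos_iff (g : Int → String) (piece : String) (j : Nat) :
    (1 ≤ pvRun g piece (j + 1)) ↔ g j = piece := by
  have := pvRun_nonneg g piece j
  simp only [pvRun]; split <;> rename_i h <;> constructor <;> intro h2 <;> first | omega | exact h | exact absurd h2 h

-- Per-row contributions of A's scan, as pure functions of the column getter g.
def pvIf1 (g : Int → String) (p : String) (n r : Int) : Int :=
  if 1 ≤ r ∧ g r = p ∧ g (r - 1) = p ∧ r + 2 < n ∧ g (r + 1) = "" ∧ g (r + 2) = "" then 1 else 0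

def pvIf2 (g : Int → String) (p : String) (r : Int) : Int :=
  if 3 ≤ r ∧ g r = p ∧ g (r - 1) = p ∧ g (r - 2) = "" ∧ g (r - 3) = "" then 1 else 0

def pvCA (g : Int → String) (p : String) (n r : Int) : Int := pvIf1 g p n r + pvIf2 g p r

-- pvIf1 with its in-board bound conjunct dropped.
def pvJ1 (g : Int → String) (p : String) (r : Int) : Int :=
  if 1 ≤ r ∧ g r = p ∧ g (r - 1) = p ∧ g (r + 1) = "" ∧ g (r + 2) = "" then 1 else 0

-- B's window contribution at start index i.
def pvCB (g : Int → String) (p : String) (i : Int) : Int :=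
  (if (g i, g (i + 1), g (i + 2), g (i + 3)) = (p, p, "", "") then 1 else 0)
  + (if (g i, g (i + 1), g (i + 2), g (i + 3)) = ("", "", p, p) then 1 else 0)

theorem pvIf1_zero (g : Int → String) (p : String) (n r : Int) (h : ¬ (1 ≤ r ∧ r + 2 < n)) :
    pvIf1 g p n r = 0 := by
  unfold pvIf1; rw [if_neg]; rintro ⟨h1, _, _, h4, _⟩; exact h ⟨h1, h4⟩

theorem pvIf2_zero (g : Int → String) (p : String) (r : Int) (h : ¬ 3 ≤ r) :
    pvIf2 g p r = 0 := by
  unfold pvIf2; rw [if_neg]; rintro ⟨h1, _⟩; exact h h1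

theorem pvJ1_zero (g : Int → String) (p : String) (r : Int) (h : ¬ 1 ≤ r) :
    pvJ1 g p r = 0 := by
  unfold pvJ1; rw [if_neg]; rintro ⟨h1, _⟩; exact h h1

theorem pvIf1_eq_J1 (g : Int → String) (p : String) (n r : Int) (h : r + 2 < n) :
    pvIf1 g p n r = pvJ1 g p r := by
  unfold pvIf1 pvJ1
  by_cases hc : 1 ≤ r ∧ g r = p ∧ g (r - 1) = p ∧ g (r + 1) = "" ∧ g (r + 2) = ""
  · rw [if_pos ⟨hc.1, hc.2.1, hc.2.2.1, h, hc.2.2.2⟩, if_pos hc]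
  · rw [if_neg (fun h' => hc ⟨h'.1, h'.2.1, h'.2.2.1, h'.2.2.2.2⟩), if_neg hc]

-- Invariant of A's inner loop: score grows by the per-row contributions, the counter is pvRun.
theorem pvAfold (g : Int → String) (p : String) (n : Int) :
    ∀ (k : Nat) (s : Int),
    (((List.range k).map (fun (x : Nat) => (x : Int))).foldl
        (fun (st : Int × Int) row =>
          if g row = p then
            if st.2 + 1 ≥ 2 then
              (if row - 3 ≥ 0 ∧ g (row - 2) = "" ∧ g (row - 3) = "" then
                 (if row + 2 < n ∧ g (row + 1) = "" ∧ g (row + 2) = "" then st.1 + 1 else st.1) + 1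
               else
                 (if row + 2 < n ∧ g (row + 1) = "" ∧ g (row + 2) = "" then st.1 + 1 else st.1),
               st.2 + 1)
            else (st.1, st.2 + 1)
          else (st.1, 0))
        (s, 0))
    = (s + ((List.range k).map (fun (r : Nat) => pvCA g p n (r : Int))).sum, pvRun g p k) := by
  intro k
  induction k with
  | zero => intro s; simp [pvRun]
  | succ j ih =>
    intro s
    rw [List.range_succ]
    simp only [List.map_append, List.map_cons, List.map_nil, List.foldl_append,
      List.sum_append, List.sum_cons, List.sum_nil, add_zero]
    rw [ih s]
    simp only [List.foldl_cons, List.foldl_nil]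
    cases j with
    | zero =>
      have hca : pvCA g p n ((0 : Nat) : Int) = 0 := by
        unfold pvCA
        rw [pvIf1_zero g p n ((0 : Nat) : Int) (by omega),
            pvIf2_zero g p ((0 : Nat) : Int) (by omega)]
        norm_num
      rw [hca, add_zero,
          show pvRun g p 0 = 0 from rfl,
          show pvRun g p (0 + 1) = if g ((0 : Nat) : Int) = p then pvRun g p 0 + 1 else 0 from rfl,
          show pvRun g p 0 = 0 from rfl]
      by_cases h0 : g ((0 : Nat) : Int) = p
      · rw [if_pos h0, if_pos h0, if_neg (by omega : ¬ (0 : Int) + 1 ≥ 2)]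
      · rw [if_neg h0, if_neg h0]
    | succ i =>
      set row : Int := ((i + 1 : Nat) : Int) with hrow
      have hprev : row - 1 = ((i : Nat) : Int) := by rw [hrow]; push_cast; ring
      rw [show pvRun g p (i + 1 + 1) = if g row = p then pvRun g p (i + 1) + 1 else 0 from rfl]
      by_cases hP : g row = p
      · rw [if_pos hP, if_pos hP]
        by_cases hR : g ((i : Nat) : Int) = p
        · have h2 : pvRun g p (i + 1) + 1 ≥ 2 := by
            have := (pvRun_pos_iff g p i).mpr hR; omega
          rw [if_pos h2]
          have hIf1 : pvIf1 g p n row = (if row + 2 < n ∧ g (row + 1) = "" ∧ g (row + 2) = "" then 1 else 0) := by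
            by_cases hc : row + 2 < n ∧ g (row + 1) = "" ∧ g (row + 2) = ""
            · rw [if_pos hc]; unfold pvIf1
              rw [if_pos ⟨by rw [hrow]; omega, hP, by rw [hprev]; exact hR, hc.1, hc.2.1, hc.2.2⟩]
            · rw [if_neg hc]; unfold pvIf1
              rw [if_neg (fun h => hc ⟨h.2.2.2.1, h.2.2.2.2⟩)]
          have hIf2 : pvIf2 g p row = (if row - 3 ≥ 0 ∧ g (row - 2) = "" ∧ g (row - 3) = "" then 1 else 0) := by
            by_cases hc : row - 3 ≥ 0 ∧ g (row - 2) = "" ∧ g (row - 3) = ""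
            · rw [if_pos hc]; unfold pvIf2
              rw [if_pos ⟨by omega, hP, by rw [hprev]; exact hR, hc.2.1, hc.2.2⟩]
            · rw [if_neg hc]; unfold pvIf2
              rw [if_neg (fun h => hc ⟨by omega, h.2.2.2.1, h.2.2.2.2⟩)]
          rw [Prod.mk.injEq]
          refine ⟨?_, rfl⟩
          simp only [pvCA, hIf1, hIf2]
          split_ifs <;> omega
        · have hrun0 : pvRun g p (i + 1) = 0 := by
            by_contra hne
            have hpos : 1 ≤ pvRun g p (i + 1) := by
              have := pvRun_nonneg g p (i + 1); omega
            exact hR ((pvRun_pos_iff g p i).mp hpos)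
          rw [if_neg (by omega : ¬ pvRun g p (i + 1) + 1 ≥ 2)]
          have hIf1 : pvIf1 g p n row = 0 := by
            unfold pvIf1; rw [if_neg]; rintro ⟨_, _, h3, _⟩; rw [hprev] at h3; exact hR h3
          have hIf2 : pvIf2 g p row = 0 := by
            unfold pvIf2; rw [if_neg]; rintro ⟨_, _, h3, _⟩; rw [hprev] at h3; exact hR h3
          rw [Prod.mk.injEq]
          refine ⟨?_, rfl⟩
          simp only [pvCA, hIf1, hIf2]
          omega
      · rw [if_neg hP, if_neg hP]
        have hIf1 : pvIf1 g p n row = 0 := by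
          unfold pvIf1; rw [if_neg]; rintro ⟨_, h2, _⟩; exact hP h2
        have hIf2 : pvIf2 g p row = 0 := by
          unfold pvIf2; rw [if_neg]; rintro ⟨_, h2, _⟩; exact hP h2
        rw [Prod.mk.injEq]
        refine ⟨?_, rfl⟩
        simp only [pvCA, hIf1, hIf2]
        omega

-- B's inner loop is the sum of the window contributions.
theorem pvBfold (g : Int → String) (p : String) :
    ∀ (l : List Int) (s : Int),
    l.foldl
      (fun total i =>
        let w := (g i, g (i + 1), g (i + 2), g (i + 3))
        let t1 := if w = (p, p, "", "") then total + 1 else total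
        if w = ("", "", p, p) then t1 + 1 else t1)
      s
    = s + (l.map (pvCB g p)).sum := by
  intro l
  induction l with
  | nil => intro s; simp
  | cons x xs ih =>
    intro s
    simp only [List.foldl_cons, List.map_cons, List.sum_cons]
    rw [ih]
    have hbody : (let w := (g x, g (x + 1), g (x + 2), g (x + 3))
        let t1 := if w = (p, p, "", "") then s + 1 else s
        if w = ("", "", p, p) then t1 + 1 else t1) = s + pvCB g p x := by
      simp only [pvCB]
      split_ifs <;> omega
    rw [hbody]; ring

-- Sum truncation: drop top indices where f vanishes.
theorem pvSumTrunc (f : Nat → Int) (k : Nat) (h0 : ∀ r, k ≤ r → f r = 0) :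
    ∀ n, k ≤ n → ((List.range n).map f).sum = ((List.range k).map f).sum := by
  intro n
  induction n with
  | zero => intro h; rw [Nat.le_zero.mp h]
  | succ m ih =>
    intro h
    rcases Nat.lt_or_ge k (m + 1) with hlt | hge
    · rw [List.sum_range_succ, ih (by omega), h0 m (by omega), add_zero]
    · rw [Nat.le_antisymm h hge]

-- Sum shift: re-index a sum by +k when f vanishes below k.
theorem pvSumShift (f : Nat → Int) (k : Nat) (h0 : ∀ r, r < k → f r = 0) :
    ∀ m, ((List.range (m + k)).map f).sum = ((List.range m).map (fun i => f (i + k))).sum := by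
  intro m
  induction m with
  | zero =>
    simp only [Nat.zero_add, List.range_zero, List.map_nil, List.sum_nil]
    refine List.sum_eq_zero ?_
    intro x hx
    obtain ⟨r, hr, rfl⟩ := List.mem_map.mp hx
    exact h0 r (List.mem_range.mp hr)
  | succ m ih =>
    rw [show m + 1 + k = (m + k) + 1 by omega, List.sum_range_succ, List.sum_range_succ, ih]

-- B's window contribution in terms of A's per-row contributions.
theorem pvCB_split (g : Int → String) (p : String) (i : Nat) :
    pvCB g p (i : Int) = pvJ1 g p ((i : Int) + 1) + pvIf2 g p ((i : Int) + 3) := by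
  unfold pvCB pvJ1 pvIf2
  rw [show ((i : Int) + 1) - 1 = (i : Int) by ring, show ((i : Int) + 1) + 1 = (i : Int) + 2 by ring,
      show ((i : Int) + 1) + 2 = (i : Int) + 3 by ring, show ((i : Int) + 3) - 1 = (i : Int) + 2 by ring,
      show ((i : Int) + 3) - 2 = (i : Int) + 1 by ring, show ((i : Int) + 3) - 3 = (i : Int) by ring]
  have c1 : ((g (i : Int), g ((i : Int) + 1), g ((i : Int) + 2), g ((i : Int) + 3)) = (p, p, "", ""))
      ↔ (1 ≤ (i : Int) + 1 ∧ g ((i : Int) + 1) = p ∧ g (i : Int) = p ∧ g ((i : Int) + 2) = "" ∧ g ((i : Int) + 3) = "") := by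
    simp only [Prod.mk.injEq]
    constructor
    · rintro ⟨a, b, c, d⟩; exact ⟨by omega, b, a, c, d⟩
    · rintro ⟨_, b, a, c, d⟩; exact ⟨a, b, c, d⟩
  have c2 : ((g (i : Int), g ((i : Int) + 1), g ((i : Int) + 2), g ((i : Int) + 3)) = ("", "", p, p))
      ↔ (3 ≤ (i : Int) + 3 ∧ g ((i : Int) + 3) = p ∧ g ((i : Int) + 2) = p ∧ g ((i : Int) + 1) = "" ∧ g (i : Int) = "") := by
    simp only [Prod.mk.injEq]
    constructor
    · rintro ⟨a, b, c, d⟩; exact ⟨by omega, d, c, b, a⟩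
    · rintro ⟨_, d, c, b, a⟩; exact ⟨a, b, c, d⟩
  rw [if_congr c1 rfl rfl, if_congr c2 rfl rfl]

-- The key identity: A's per-row contributions over a column of height n sum to B's window counts.
theorem pvKey (g : Int → String) (p : String) (n : Nat) (hn : 3 ≤ n) :
    ((List.range n).map (fun (r : Nat) => pvCA g p (n : Int) (r : Int))).sum
    = ((List.range (n - 3)).map (fun (i : Nat) => pvCB g p (i : Int))).sum := by
  have hsplit : ((List.range n).map (fun (r : Nat) => pvCA g p (n : Int) (r : Int))).sum
      = ((List.range n).map (fun (r : Nat) => pvIf1 g p (n : Int) (r : Int))).sum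
        + ((List.range n).map (fun (r : Nat) => pvIf2 g p (r : Int))).sum := by
    rw [← PySem.List.sum_map_add_int]; rfl
  rw [hsplit]
  have h1a : ((List.range n).map (fun (r : Nat) => pvIf1 g p (n : Int) (r : Int))).sum
      = ((List.range (n - 2)).map (fun (r : Nat) => pvIf1 g p (n : Int) (r : Int))).sum :=
    pvSumTrunc (fun (r : Nat) => pvIf1 g p (n : Int) (r : Int)) (n - 2)
      (fun r hr => pvIf1_zero g p (n : Int) (r : Int) (by omega)) n (by omega)
  have h1b : ((List.range (n - 2)).map (fun (r : Nat) => pvIf1 g p (n : Int) (r : Int))).sum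
      = ((List.range (n - 2)).map (fun (r : Nat) => pvJ1 g p (r : Int))).sum := by
    refine congrArg List.sum (List.map_congr_left ?_)
    intro r hr
    exact pvIf1_eq_J1 g p (n : Int) (r : Int) (by have := List.mem_range.mp hr; omega)
  have hB : ((List.range (n - 3)).map (fun (i : Nat) => pvCB g p (i : Int))).sum
      = ((List.range (n - 3)).map (fun (i : Nat) => pvJ1 g p ((i : Int) + 1))).sum
        + ((List.range (n - 3)).map (fun (i : Nat) => pvIf2 g p ((i : Int) + 3))).sum := by
    rw [← PySem.List.sum_map_add_int]
    exact congrArg List.sum (List.map_congr_left (fun i _ => pvCB_split g p i))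
  rw [hB]
  congr 1
  · have hsh := pvSumShift (fun (r : Nat) => pvJ1 g p (r : Int)) 1
      (fun r hr => pvJ1_zero g p (r : Int) (by omega)) (n - 3)
    rw [show n - 3 + 1 = n - 2 by omega] at hsh
    rw [h1a, h1b, hsh]
    refine congrArg List.sum (List.map_congr_left ?_)
    intro i _
    show pvJ1 g p ((i + 1 : Nat) : Int) = pvJ1 g p ((i : Int) + 1)
    rw [show ((i + 1 : Nat) : Int) = (i : Int) + 1 by push_cast; ring]
  · have hsh := pvSumShift (fun (r : Nat) => pvIf2 g p (r : Int)) 3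
      (fun r hr => pvIf2_zero g p (r : Int) (by omega)) (n - 3)
    rw [show n - 3 + 3 = n by omega] at hsh
    rw [hsh]
    refine congrArg List.sum (List.map_congr_left ?_)
    intro i _
    show pvIf2 g p ((i + 3 : Nat) : Int) = pvIf2 g p ((i : Int) + 3)
    rw [show ((i + 3 : Nat) : Int) = (i : Int) + 3 by push_cast; ring]

-- A board shorter than 3 rows contributes nothing on the A side.
theorem pvSumSmall (g : Int → String) (p : String) (n : Nat) (h : n < 3) :
    ((List.range n).map (fun (r : Nat) => pvCA g p (n : Int) (r : Int))).sum = 0 := by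
  refine List.sum_eq_zero ?_
  intro x hx
  obtain ⟨r, hr, rfl⟩ := List.mem_map.mp hx
  have hrn := List.mem_range.mp hr
  unfold pvCA
  rw [pvIf1_zero g p (n : Int) (r : Int) (by omega), pvIf2_zero g p (r : Int) (by omega)]
  norm_num

-- ===== VERDICT (by name: the statement is the Claim_ definition above) =====
theorem connected_twos_vertical_py_spec : Claim_equal_connected_twos_vertical_py := by
  unfold Claim_equal_connected_twos_vertical_py
  intro board piece _ _
  unfold Spec_connected_twos_vertical_py
  unfold connected_twos_vertical_py connected_twos_vertical_py_alt
  set n : Nat := board.length with hnn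
  set c : Nat := (PySem.List.pyGetD board 0 []).length with hc
  rw [PySem.List.pyRange_zero_natCast c]
  rw [List.foldl_map, List.foldl_map]
  apply PySem.List.foldl_congr_mem
  intro s j _
  set g : Int → String := fun i => pvCell board i (j : Int) with hg
  rw [PySem.List.pyRange_zero_natCast n]
  refine Eq.trans (congrArg Prod.fst (pvAfold g piece ((n : Nat) : Int) n s)) ?_
  show s + ((List.range n).map (fun (r : Nat) => pvCA g piece ((n : Nat) : Int) (r : Int))).sum = _
  rcases Nat.lt_or_ge n 3 with hsmall | hbig
  · rw [PySem.List.pyRange_one_eq_nil (by omega : ((n : Nat) : Int) - 3 ≤ 0)]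
    simp only [List.foldl_nil]
    rw [pvSumSmall g piece n hsmall, add_zero]
  · rw [show ((n : Nat) : Int) - 3 = ((n - 3 : Nat) : Int) by omega,
        PySem.List.pyRange_zero_natCast (n - 3)]
    have hBshape : (((List.range (n - 3)).map (fun (x : Nat) => (x : Int))).map (pvCB g piece)).sum
        = ((List.range (n - 3)).map (fun (i : Nat) => pvCB g piece (i : Int))).sum := by
      rw [List.map_map]; rfl
    refine Eq.trans ?_ (pvBfold g piece ((List.range (n - 3)).map (fun (x : Nat) => (x : Int))) s).symm
    rw [hBshape, pvKey g piece n hbig]
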